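-- pv_equiv track=rewrite | github.com/genp324/itea_python_basics_3 | pilin_dmitriy/05/text_analyzer_2.0.py | pretify
-- ===== SOURCE A (Python) =====
-- EXCLUDED_SYMBOLS = ('(',')',',', '-', '"', '.', '!', ':', '?', '\n')
--
-- EXCLUDED_WORDS = ('a', 'may', 'an', 'to', 'the', 'is', 'of', 'have', 'been', 'are', 'was', 'were', 'will', 'would', 'could', 'and', 'or', 'if', 'he', 'she', 'it', 'this', 'my', 'an', 'as', 'by', 'has', 'in', 'on')
--
-- def pretify(text):
--     """
--     :param arg1: string
--     :type arg1: str
--     :return: return prettified list of words cleared with list of exluded_words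
--     :rtype: return list
--     """
--     try:
--         for i in EXCLUDED_SYMBOLS:
--
--             text=text.replace(i,' ')
--
--         texts = ''
--
--         for i in text:
--
--             if not i.isdigit() :
--                 texts += ''.join(i)
--
--         texts=texts.lower().split()
--
--         pretify_text = list(filter(lambda word: word not in EXCLUDED_WORDS, texts))
--
--         return pretify_text
--
--     except AttributeError:
--         raise AttributeError('Only text string allowed.')
-- ===== SOURCE B (Python) =====
-- EXCLUDED_SYMBOLS = ('(',')',',', '-', '"', '.', '!', ':', '?', '\n')
--
-- EXCLUDED_WORDS = ('a', 'may', 'an', 'to', 'the', 'is', 'of', 'have', 'been', 'are', 'was', 'were', 'will', 'would', 'could', 'and', 'or', 'if', 'he', 'she', 'it', 'this', 'my', 'an', 'as', 'by', 'has', 'in', 'on')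
--
-- _SYMBOL_SET = set(EXCLUDED_SYMBOLS)
-- _WORD_SET = set(EXCLUDED_WORDS)
--
-- def pretify(text):
--     # one pass over the lowercased text: drop digits, turn excluded symbols into spaces
--     cleaned = []
--     for ch in text.lower():
--         if ch.isdigit():
--             continue
--         cleaned.append(' ' if ch in _SYMBOL_SET else ch)
--     return [w for w in ''.join(cleaned).split() if w not in _WORD_SET]
-- ===== Notes on version B (the rewrite author's own statement) =====
-- stated objective: faster
-- what changed: Replaced A's ten successive str.replace passes over the whole text plus a separate digit-stripping concatenation loop by a single character-level pass over the lowercased text (digits dropped, excluded symbols mapped to spaces, set lookups), then split and filter.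
import Mathlib
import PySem

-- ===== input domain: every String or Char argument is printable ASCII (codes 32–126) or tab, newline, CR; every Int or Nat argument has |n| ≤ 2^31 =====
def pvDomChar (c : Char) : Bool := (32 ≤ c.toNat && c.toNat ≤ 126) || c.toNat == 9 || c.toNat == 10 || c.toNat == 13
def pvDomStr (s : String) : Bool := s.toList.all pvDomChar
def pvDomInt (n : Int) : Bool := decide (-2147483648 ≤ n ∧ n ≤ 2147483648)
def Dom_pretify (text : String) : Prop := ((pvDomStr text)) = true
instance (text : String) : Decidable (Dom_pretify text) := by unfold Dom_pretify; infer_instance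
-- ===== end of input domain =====

-- B replaces A's ten successive str.replace passes plus a separate digit-stripping pass
-- by one character-level pass over the lowercased text with set lookups (objective: faster, measured).

-- ===== PORT A =====
def pvExSyms : List Char := ['(', ')', ',', '-', '"', '.', '!', ':', '?', '\n']

def pvExWords : List String :=
  ["a", "may", "an", "to", "the", "is", "of", "have", "been", "are", "was", "were",
   "will", "would", "could", "and", "or", "if", "he", "she", "it", "this", "my",
   "an", "as", "by", "has", "in", "on"]

def pretify (text : String) : List String :=
  -- for i in EXCLUDED_SYMBOLS: text = text.replace(i, ' ')
  let t := pvExSyms.foldl (fun t i => PySem.Str.replace t (String.ofList [i]) " ") text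
  -- texts = ''; for i in text: if not i.isdigit(): texts += ''.join(i)
  let texts := t.toList.foldl
    (fun acc i => if !(PySem.Chars.isdigit i) then acc ++ [i] else acc) ([] : List Char)
  -- texts = texts.lower().split()
  let ws := PySem.Str.split₀ (PySem.Str.lower (String.ofList texts))
  -- list(filter(lambda word: word not in EXCLUDED_WORDS, texts))
  ws.filter (fun w => !(pvExWords.contains w))

-- ===== PORT B =====
def pvSymSet : PySem.Set Char := PySem.Set.ofList pvExSyms
def pvWordSet : PySem.Set String := PySem.Set.ofList pvExWords

def pretify_alt (text : String) : List String :=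
  let lowered := PySem.Str.lower text
  let cleaned := lowered.toList.filterMap
    (fun ch => if PySem.Chars.isdigit ch then none
               else some (if pvSymSet.contains ch then ' ' else ch))
  (PySem.Str.split₀ (String.ofList cleaned)).filter (fun w => !(pvWordSet.contains w))

-- ===== PRECONDITION & SPEC =====
def Spec_pretify (text : String) (out : List String) : Prop := out = pretify_alt text
instance (text : String) (out : List String) : Decidable (Spec_pretify text out) := by
  unfold Spec_pretify; infer_instance

-- ===== CLAIM (what is proved, stated in full; the proofs are below) =====
def Claim_equal_pretify : Prop := ∀ (text : String), Dom_pretify text → Spec_pretify text (pretify text)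

-- ===== LEMMAS AND PROOFS =====

-- the effect of A's per-symbol replace on one character
def pvSymF (c : Char) : Char := if c ∈ pvExSyms then ' ' else c

-- replacing a single-character pattern is a map
theorem pv_replace_go_map (a b : Char) :
    ∀ (fuel : Nat) (l acc : List Char), l.length ≤ fuel →
      PySem.Chars.replace.go [a] [b] fuel l acc
        = acc.reverse ++ l.map (fun c => if c = a then b else c) := by
  intro fuel
  induction fuel with
  | zero =>
    intro l acc h
    have : l = [] := by cases l <;> simp_all
    subst this; simp [PySem.Chars.replace.go]
  | succ n ih =>
    intro l acc h
    cases l with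
    | nil => simp [PySem.Chars.replace.go]
    | cons c t =>
      have ht : t.length ≤ n := by simp at h; omega
      by_cases hc : c = a
      · subst hc
        have hp : [c].isPrefixOf (c :: t) = true := by simp [List.isPrefixOf]
        rw [PySem.Chars.replace.go, if_pos hp]
        simp only [List.length_cons, List.length_nil, List.drop_succ_cons, List.drop_zero]
        rw [ih _ _ ht]
        simp
      · have hp : [a].isPrefixOf (c :: t) = false := by
          simp [List.isPrefixOf]
          exact fun h => hc h.symm
        rw [PySem.Chars.replace.go, if_neg (by rw [hp]; exact Bool.false_ne_true)]
        rw [ih _ _ ht]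
        simp [hc]

theorem pv_replace_one (l : List Char) (a b : Char) :
    PySem.Chars.replace l [a] [b] = l.map (fun c => if c = a then b else c) := by
  simp only [PySem.Chars.replace, List.isEmpty_cons, if_neg Bool.false_ne_true]
  simpa using pv_replace_go_map a b l.length l [] le_rfl

-- push .toList through A's string-level replace fold
theorem pv_fold_toList (syms : List Char) :
    ∀ (s : String),
      (syms.foldl (fun t i => PySem.Str.replace t (String.ofList [i]) " ") s).toList
        = syms.foldl (fun l i => PySem.Chars.replace l [i] [' ']) s.toList := by
  induction syms with
  | nil => intro s; simp
  | cons x xs ih =>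
    intro s
    simp only [List.foldl_cons]
    rw [ih, PySem.Str.toList_replace, String.toList_ofList]
    have hsp : (" " : String).toList = [' '] := by decide
    rw [hsp]

theorem pv_fold_map (cs : List Char) :
    pvExSyms.foldl (fun l i => PySem.Chars.replace l [i] [' ']) cs = cs.map pvSymF := by
  simp only [pvExSyms, List.foldl_cons, List.foldl_nil, pv_replace_one, List.map_map]
  refine List.map_congr_left ?_
  intro c _
  by_cases h1 : c = '(';  · subst h1; decide
  by_cases h2 : c = ')';  · subst h2; decide
  by_cases h3 : c = ',';  · subst h3; decide
  by_cases h4 : c = '-';  · subst h4; decide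
  by_cases h5 : c = '"';  · subst h5; decide
  by_cases h6 : c = '.';  · subst h6; decide
  by_cases h7 : c = '!';  · subst h7; decide
  by_cases h8 : c = ':';  · subst h8; decide
  by_cases h9 : c = '?';  · subst h9; decide
  by_cases h10 : c = '\n'; · subst h10; decide
  simp [Function.comp, pvSymF, pvExSyms, h1, h2, h3, h4, h5, h6, h7, h8, h9, h10]

theorem pv_map_filter_filterMap {α β : Type} (f : α → β) (p : α → Bool) (l : List α) :
    (l.filter p).map f = l.filterMap (fun c => if p c then some (f c) else none) := by
  induction l with
  | nil => rfl
  | cons c t ih =>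
    by_cases h : p c <;> simp [h, ih]

-- the per-character agreement of the two pipelines, on domain characters
set_option maxRecDepth 8192 in
theorem pv_char_key (c : Char) (hc : pvDomChar c = true) :
    (if (!(PySem.Chars.isdigit (pvSymF c))) = true
       then some (PySem.Chars.lowerChar (pvSymF c)) else none)
      = (if PySem.Chars.isdigit (PySem.Chars.lowerChar c) then none
         else some (if pvSymSet.contains (PySem.Chars.lowerChar c) then ' '
                    else PySem.Chars.lowerChar c)) := by
  have hlt : c.toNat < 128 := by
    simp only [pvDomChar, Bool.or_eq_true, Bool.and_eq_true, decide_eq_true_eq,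
      beq_iff_eq] at hc
    omega
  have hall : ∀ n ∈ List.range 128,
      (if (!(PySem.Chars.isdigit (pvSymF (Char.ofNat n)))) = true
         then some (PySem.Chars.lowerChar (pvSymF (Char.ofNat n))) else none)
        = (if PySem.Chars.isdigit (PySem.Chars.lowerChar (Char.ofNat n)) then none
           else some (if pvSymSet.contains (PySem.Chars.lowerChar (Char.ofNat n)) then ' '
                      else PySem.Chars.lowerChar (Char.ofNat n))) := by decide
  have := hall c.toNat (List.mem_range.mpr hlt)
  rwa [Char.ofNat_toNat] at this

-- the cleaned character lists coincide
theorem pv_list_eq (cs : List Char) (h : ∀ c ∈ cs, pvDomChar c = true) :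
    PySem.Chars.lower
      ((pvExSyms.foldl (fun l i => PySem.Chars.replace l [i] [' ']) cs).filter
        (fun i => !(PySem.Chars.isdigit i)))
      = (PySem.Chars.lower cs).filterMap
          (fun ch => if PySem.Chars.isdigit ch then none
                     else some (if pvSymSet.contains ch then ' ' else ch)) := by
  rw [pv_fold_map, PySem.Chars.lower, PySem.Chars.lower, List.filter_map, List.map_map,
    List.filterMap_map, pv_map_filter_filterMap]
  refine List.filterMap_congr ?_
  intro c hcmem
  exact pv_char_key c (h c hcmem)

theorem pv_word_key (w : String) :
    (!(pvWordSet.contains w)) = (!(pvExWords.contains w)) := by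
  have h1 : pvWordSet.contains w = true ↔ w ∈ pvExWords := by
    rw [PySem.Set.contains_iff]
    unfold pvWordSet
    exact PySem.Set.mem_ofList pvExWords w
  have h2 : pvExWords.contains w = true ↔ w ∈ pvExWords := List.contains_iff_mem
  cases hb1 : pvWordSet.contains w <;> cases hb2 : pvExWords.contains w <;> simp_all

-- ===== VERDICT (by name: the statement is the Claim_ definition above) =====
theorem pretify_spec : Claim_equal_pretify := by
  intro text hdom
  unfold Spec_pretify
  simp only [pretify, pretify_alt]
  have hstr : PySem.Str.lower (String.ofList
      ((pvExSyms.foldl (fun t i => PySem.Str.replace t (String.ofList [i]) " ") text).toList.foldl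
        (fun acc i => if !(PySem.Chars.isdigit i) then acc ++ [i] else acc) ([] : List Char)))
      = String.ofList ((PySem.Str.lower text).toList.filterMap
          (fun ch => if PySem.Chars.isdigit ch then none
                     else some (if pvSymSet.contains ch then ' ' else ch))) := by
    apply String.toList_inj.mp
    rw [PySem.Str.toList_lower, String.toList_ofList, String.toList_ofList,
      PySem.Str.toList_lower]
    rw [PySem.List.foldl_append_if (p := fun i => !(PySem.Chars.isdigit i)) (f := fun i => i)]
    simp only [List.map_id', List.nil_append]
    rw [pv_fold_toList]
    apply pv_list_eq
    have := hdom
    unfold Dom_pretify pvDomStr at this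
    exact fun c hc => (List.all_eq_true.mp this) c hc
  rw [hstr]
  refine List.filter_congr ?_
  intro w _
  exact (pv_word_key w).symm
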